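-- pv_equiv track=rewrite | github.com/MechChronicles/Code-Sprints | problems/hard/Grid_Cleaner/Grid_Cleaner.py | Grid_Cleaner
-- ===== SOURCE A (Python) =====
-- def Grid_Cleaner(grid, col, row, n, direction=0):
--     # Direction deltas: N, E, S, W
--     directions = [(-1, 0), (0, 1), (1, 0), (0, -1)]
--
--     for _ in range(n):
--         # Ensure current row exists
--         if row < 0:
--             grid.insert(0, [0] * len(grid[0]))
--             row = 0
--         elif row >= len(grid):
--             grid.append([0] * len(grid[0]))
--
--         # Ensure current column exists
--         if col < 0:
--             for r in grid:
--                 r.insert(0, 0)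
--             col = 0
--         elif col >= len(grid[0]):
--             for r in grid:
--                 r.append(0)
--
--         # Read current tile
--         tile = grid[row][col]
--
--         if tile == 1:
--             # Clean tile: turn right, mark dirty
--             direction = (direction + 1) % 4
--             grid[row][col] = 0
--         else:
--             # Dirty tile: turn left, mark clean
--             direction = (direction - 1) % 4
--             grid[row][col] = 1
--
--         # Move forward
--         d_row, d_col = directions[direction]
--         row += d_row
--         col += d_col
--
--     return grid
-- ===== SOURCE B (Python) =====
-- def Grid_Cleaner(grid, col, row, n, direction=0):
--     # Simulate in a fixed global frame: a dict of flipped cells plus a growing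
--     # bounding box, then rebuild the grid once at the end (written back in place).
--     if n <= 0:
--         return grid
--     rows, cols = len(grid), len(grid[0])
--     minR, maxR, minC, maxC = 0, rows - 1, 0, cols - 1
--     cells = {}
--     r, c, d = row, col, direction
--     for _ in range(n):
--         if r < minR:
--             minR -= 1
--             r = minR
--         elif r > maxR:
--             maxR += 1
--         if c < minC:
--             minC -= 1
--             c = minC
--         elif c > maxC:
--             maxC += 1
--         tile = cells.get((r, c), grid[r][c] if 0 <= r < rows and 0 <= c < cols else 0)
--         if tile == 1:
--             d = (d + 1) % 4
--             cells[(r, c)] = 0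
--         else:
--             d = (d - 1) % 4
--             cells[(r, c)] = 1
--         dr, dc = ((-1, 0), (0, 1), (1, 0), (0, -1))[d]
--         r += dr
--         c += dc
--     new_rows = [[cells.get((i, j), grid[i][j] if 0 <= i < rows and 0 <= j < cols else 0)
--                  for j in range(minC, maxC + 1)] for i in range(minR, maxR + 1)]
--     grid[:] = new_rows
--     return grid
-- ===== Notes on version B (the rewrite author's own statement) =====
-- stated objective: alternative
-- what changed: B simulates the ant in a fixed global coordinate frame with a dict of flipped cells and a growing bounding box, rebuilding the grid once at the end, instead of A's repeated in-place row/column insertion and appending during the walk.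
-- outside the precondition, e.g. on Grid_Cleaner([[1, 0], [0]], 0, 0, 1, 0): A returns [[0, 0], [0]], B raises IndexError
import Mathlib
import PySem

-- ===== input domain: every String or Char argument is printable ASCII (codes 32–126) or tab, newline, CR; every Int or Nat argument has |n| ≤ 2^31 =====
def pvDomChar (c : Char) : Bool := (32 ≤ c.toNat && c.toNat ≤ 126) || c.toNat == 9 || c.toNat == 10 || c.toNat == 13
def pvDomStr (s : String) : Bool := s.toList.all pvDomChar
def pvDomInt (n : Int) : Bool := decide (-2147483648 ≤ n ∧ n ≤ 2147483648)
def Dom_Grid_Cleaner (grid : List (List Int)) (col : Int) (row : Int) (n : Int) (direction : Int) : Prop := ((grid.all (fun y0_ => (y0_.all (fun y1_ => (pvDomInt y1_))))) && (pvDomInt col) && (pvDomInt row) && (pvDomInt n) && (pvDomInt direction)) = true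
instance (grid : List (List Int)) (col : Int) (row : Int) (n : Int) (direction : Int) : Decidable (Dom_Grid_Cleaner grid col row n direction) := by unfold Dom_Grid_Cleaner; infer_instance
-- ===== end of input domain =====

-- B simulates the ant in a fixed global frame (dict of flipped cells + growing bounding box,
-- one final rebuild) instead of A's in-place row/column insertions during the walk; the
-- equivalence proved here is about the RETURN value (both Pythons also mutate `grid` to it).

-- ===== PORT A =====
-- one step of A's loop body; state = (grid, col, row, direction)
def gcStepA (st : List (List Int) × Int × Int × Int) : List (List Int) × Int × Int × Int :=
  let g := st.1
  let col := st.2.1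
  let row := st.2.2.1
  let dir := st.2.2.2
  -- ensure current row exists (grid[0] on an empty grid raises in Python: outside Pre_)
  let g1 := if row < 0 then List.replicate (g.headD []).length (0 : Int) :: g
            else if row ≥ (g.length : Int) then g ++ [List.replicate (g.headD []).length (0 : Int)]
            else g
  let row1 := if row < 0 then (0 : Int) else row
  -- ensure current column exists
  let g2 := if col < 0 then g1.map (fun r => (0 : Int) :: r)
            else if col ≥ ((g1.headD []).length : Int) then g1.map (fun r => r ++ [(0 : Int)])
            else g1
  let col2 := if col < 0 then (0 : Int) else col
  -- read current tile; pyGet? none = Python IndexError, unreached under Pre_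
  let tile := (PySem.List.pyGet? ((PySem.List.pyGet? g2 row1).getD []) col2).getD 0
  let dir2 := if tile = 1 then PySem.Int.mod (dir + 1) 4 else PySem.Int.mod (dir - 1) 4
  -- grid[row][col] = v ; row1, col2 are ≥ 0 here by construction, so .toNat is exact
  let g3 := if tile = 1 then g2.modify row1.toNat (fun r => r.set col2.toNat (0 : Int))
            else g2.modify row1.toNat (fun r => r.set col2.toNat (1 : Int))
  let delta := (PySem.List.pyGet? [((-1 : Int), (0 : Int)), (0, 1), (1, 0), (0, -1)] dir2).getD (0, 0)
  (g3, col2 + delta.2, row1 + delta.1, dir2)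

def Grid_Cleaner (grid : List (List Int)) (col : Int) (row : Int) (n : Int) (direction : Int) : List (List Int) :=
  ((PySem.List.pyRange 0 n 1).foldl (fun st _ => gcStepA st) (grid, col, row, direction)).1

-- ===== PORT B =====
structure GCState where
  cells : PySem.Dict (Int × Int) Int
  minR : Int
  maxR : Int
  minC : Int
  maxC : Int
  r : Int
  c : Int
  d : Int
deriving Repr, DecidableEq

-- cells.get((i,j), grid[i][j] if 0 <= i < rows and 0 <= j < cols else 0)
def gcCell (grid : List (List Int)) (rows cols : Int) (cells : PySem.Dict (Int × Int) Int) (i j : Int) : Int :=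
  cells.getD (i, j)
    (if 0 ≤ i ∧ i < rows ∧ 0 ≤ j ∧ j < cols then (PySem.List.pyGet? ((PySem.List.pyGet? grid i).getD []) j).getD 0 else 0)

def gcStepB (grid : List (List Int)) (rows cols : Int) (s : GCState) : GCState :=
  let s1 := if s.r < s.minR then { s with minR := s.minR - 1, r := s.minR - 1 }
            else if s.r > s.maxR then { s with maxR := s.maxR + 1 }
            else s
  let s2 := if s1.c < s1.minC then { s1 with minC := s1.minC - 1, c := s1.minC - 1 }
            else if s1.c > s1.maxC then { s1 with maxC := s1.maxC + 1 }
            else s1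
  let tile := gcCell grid rows cols s2.cells s2.r s2.c
  let s3 := if tile = 1 then { s2 with d := PySem.Int.mod (s2.d + 1) 4, cells := s2.cells.insert (s2.r, s2.c) 0 }
            else { s2 with d := PySem.Int.mod (s2.d - 1) 4, cells := s2.cells.insert (s2.r, s2.c) 1 }
  let delta := (PySem.List.pyGet? [((-1 : Int), (0 : Int)), (0, 1), (1, 0), (0, -1)] s3.d).getD (0, 0)
  { s3 with r := s3.r + delta.1, c := s3.c + delta.2 }

-- the final list-of-lists rebuild (Source B's closing comprehension)
def gcRender (grid : List (List Int)) (rows cols : Int) (cells : PySem.Dict (Int × Int) Int)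
    (minR maxR minC maxC : Int) : List (List Int) :=
  (PySem.List.pyRange minR (maxR + 1) 1).map (fun i =>
    (PySem.List.pyRange minC (maxC + 1) 1).map (fun j => gcCell grid rows cols cells i j))

def Grid_Cleaner_alt (grid : List (List Int)) (col : Int) (row : Int) (n : Int) (direction : Int) : List (List Int) :=
  if n ≤ 0 then grid
  else
    let rows : Int := grid.length
    let cols : Int := (grid.headD []).length  -- grid[0]; empty grid raises in Python, outside Pre_
    let s0 : GCState := ⟨PySem.Dict.empty, 0, rows - 1, 0, cols - 1, row, col, direction⟩
    let s := (PySem.List.pyRange 0 n 1).foldl (fun s _ => gcStepB grid rows cols s) s0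
    gcRender grid rows cols s.cells s.minR s.maxR s.minC s.maxC

-- ===== PRECONDITION & SPEC =====
-- When n ≥ 1, Pre_ requires a nonempty rectangular grid with the start at most one cell past
-- the grid (further out A raises IndexError); it also excludes ragged grids, on which A's
-- row/column bookkeeping keyed to grid[0] is accidental and may return or raise depending on
-- the walk (A can return there while B raises; see the cite in claim.json).
def Pre_Grid_Cleaner (grid : List (List Int)) (col : Int) (row : Int) (n : Int) (direction : Int) : Prop :=
  n ≤ 0 ∨ (grid ≠ [] ∧ (∀ r ∈ grid, r.length = (grid.headD []).length) ∧
           row ≤ (grid.length : Int) ∧ col ≤ ((grid.headD []).length : Int))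
instance (grid : List (List Int)) (col : Int) (row : Int) (n : Int) (direction : Int) : Decidable (Pre_Grid_Cleaner grid col row n direction) := by unfold Pre_Grid_Cleaner; infer_instance

def pvWitness_Grid_Cleaner : List (List Int) × Int × Int × Int × Int := ([[1, 0], [0, 1]], 0, 0, 3, 0)

def Spec_Grid_Cleaner (grid : List (List Int)) (col : Int) (row : Int) (n : Int) (direction : Int) (out : List (List Int)) : Prop := out = Grid_Cleaner_alt grid col row n direction
instance (grid : List (List Int)) (col : Int) (row : Int) (n : Int) (direction : Int) (out : List (List Int)) : Decidable (Spec_Grid_Cleaner grid col row n direction out) := by unfold Spec_Grid_Cleaner; infer_instance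

-- ===== CLAIM (what is proved, stated in full; the proofs are below) =====
def Claim_equal_Grid_Cleaner : Prop := ∀ (grid : List (List Int)) (col : Int) (row : Int) (n : Int) (direction : Int), Dom_Grid_Cleaner grid col row n direction → Pre_Grid_Cleaner grid col row n direction → Spec_Grid_Cleaner grid col row n direction (Grid_Cleaner grid col row n direction)

-- ===== LEMMAS AND PROOFS =====

-- invariant maintained by B's loop state
def gcW (grid : List (List Int)) (s : GCState) : Prop :=
  s.minR ≤ 0 ∧ (grid.length : Int) - 1 ≤ s.maxR ∧ s.minC ≤ 0 ∧ ((grid.headD []).length : Int) - 1 ≤ s.maxC ∧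
  s.r ≤ s.maxR + 1 ∧ s.c ≤ s.maxC + 1 ∧
  (∀ p : Int × Int, s.cells.contains p = true → s.minR ≤ p.1 ∧ p.1 ≤ s.maxR ∧ s.minC ≤ p.2 ∧ p.2 ≤ s.maxC)

-- abstraction: the A-state a B-state denotes
def gcAbs (grid : List (List Int)) (s : GCState) : List (List Int) × Int × Int × Int :=
  (gcRender grid grid.length (grid.headD []).length s.cells s.minR s.maxR s.minC s.maxC,
   s.c - s.minC, s.r - s.minR, s.d)

-- one rendered row
def gcRow (grid : List (List Int)) (rows cols : Int) (cells : PySem.Dict (Int × Int) Int)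
    (minC maxC i : Int) : List Int :=
  (PySem.List.pyRange minC (maxC + 1) 1).map (fun j => gcCell grid rows cols cells i j)

theorem gcRender_eq (grid : List (List Int)) (rows cols : Int) (cells : PySem.Dict (Int × Int) Int)
    (minR maxR minC maxC : Int) :
    gcRender grid rows cols cells minR maxR minC maxC =
      (PySem.List.pyRange minR (maxR + 1) 1).map (gcRow grid rows cols cells minC maxC) := rfl

theorem gcCell_fresh (grid : List (List Int)) (rows cols : Int) (cells : PySem.Dict (Int × Int) Int)
    (i j : Int) (h : cells.contains (i, j) = false) (hij : i < 0 ∨ rows ≤ i ∨ j < 0 ∨ cols ≤ j) :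
    gcCell grid rows cols cells i j = 0 := by
  unfold gcCell
  rw [PySem.Dict.getD_of_not_contains _ _ h]
  have hg : ¬(0 ≤ i ∧ i < rows ∧ 0 ≤ j ∧ j < cols) := by omega
  simp [hg]

theorem gcCell_insert (grid : List (List Int)) (rows cols : Int) (cells : PySem.Dict (Int × Int) Int)
    (r c v i j : Int) :
    gcCell grid rows cols (cells.insert (r, c) v) i j =
      if i = r ∧ j = c then v else gcCell grid rows cols cells i j := by
  unfold gcCell
  rw [PySem.Dict.getD_insert]
  simp only [Prod.mk.injEq]

theorem gcRow_len (grid : List (List Int)) (rows cols : Int) (cells : PySem.Dict (Int × Int) Int)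
    (minC maxC i : Int) : (gcRow grid rows cols cells minC maxC i).length = (maxC + 1 - minC).toNat := by
  simp [gcRow, PySem.List.length_pyRange_one]

theorem gcRow_getElem (grid : List (List Int)) (rows cols : Int) (cells : PySem.Dict (Int × Int) Int)
    (minC maxC i : Int) (a : Nat) (h : a < (gcRow grid rows cols cells minC maxC i).length) :
    (gcRow grid rows cols cells minC maxC i)[a] = gcCell grid rows cols cells i (minC + a) := by
  simp [gcRow, PySem.List.getElem_pyRange_one]

theorem gcRow_fresh (grid : List (List Int)) (rows cols : Int) (cells : PySem.Dict (Int × Int) Int)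
    (minC maxC i : Int) (h : ∀ j, cells.contains (i, j) = false) (hi : i < 0 ∨ rows ≤ i) :
    gcRow grid rows cols cells minC maxC i = List.replicate (maxC + 1 - minC).toNat 0 := by
  unfold gcRow
  rw [List.map_congr_left (g := fun _ => (0 : Int))
    (fun j _ => gcCell_fresh grid rows cols cells i j (h j) (by omega)),
    List.map_const', PySem.List.length_pyRange_one]

theorem gcRow_cons (grid : List (List Int)) (rows cols : Int) (cells : PySem.Dict (Int × Int) Int)
    (minC maxC i : Int) (h : minC ≤ maxC + 1) :
    gcRow grid rows cols cells (minC - 1) maxC i =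
      gcCell grid rows cols cells i (minC - 1) :: gcRow grid rows cols cells minC maxC i := by
  unfold gcRow
  rw [PySem.List.pyRange_one_cons (by omega)]
  simp

theorem gcRow_snoc (grid : List (List Int)) (rows cols : Int) (cells : PySem.Dict (Int × Int) Int)
    (minC maxC i : Int) (h : minC ≤ maxC + 1) :
    gcRow grid rows cols cells minC (maxC + 1) i =
      gcRow grid rows cols cells minC maxC i ++ [gcCell grid rows cols cells i (maxC + 1)] := by
  unfold gcRow
  rw [PySem.List.pyRange_one_succ_right (by omega)]
  simp

theorem gcRender_len (grid : List (List Int)) (rows cols : Int) (cells : PySem.Dict (Int × Int) Int)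
    (minR maxR minC maxC : Int) :
    (gcRender grid rows cols cells minR maxR minC maxC).length = (maxR + 1 - minR).toNat := by
  simp [gcRender, PySem.List.length_pyRange_one]

theorem gcRender_getElem (grid : List (List Int)) (rows cols : Int) (cells : PySem.Dict (Int × Int) Int)
    (minR maxR minC maxC : Int) (a : Nat) (h : a < (gcRender grid rows cols cells minR maxR minC maxC).length) :
    (gcRender grid rows cols cells minR maxR minC maxC)[a] = gcRow grid rows cols cells minC maxC (minR + a) := by
  simp [gcRender_eq, PySem.List.getElem_pyRange_one]

theorem gcRender_cons (grid : List (List Int)) (rows cols : Int) (cells : PySem.Dict (Int × Int) Int)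
    (minR maxR minC maxC : Int) (h : minR ≤ maxR + 1) :
    gcRender grid rows cols cells (minR - 1) maxR minC maxC =
      gcRow grid rows cols cells minC maxC (minR - 1) :: gcRender grid rows cols cells minR maxR minC maxC := by
  rw [gcRender_eq, PySem.List.pyRange_one_cons (by omega), gcRender_eq]
  simp

theorem gcRender_snoc (grid : List (List Int)) (rows cols : Int) (cells : PySem.Dict (Int × Int) Int)
    (minR maxR minC maxC : Int) (h : minR ≤ maxR + 1) :
    gcRender grid rows cols cells minR (maxR + 1) minC maxC =
      gcRender grid rows cols cells minR maxR minC maxC ++ [gcRow grid rows cols cells minC maxC (maxR + 1)] := by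
  rw [gcRender_eq, PySem.List.pyRange_one_succ_right (by omega), gcRender_eq]
  simp

theorem gcRender_headD (grid : List (List Int)) (rows cols : Int) (cells : PySem.Dict (Int × Int) Int)
    (minR maxR minC maxC : Int) (h : minR ≤ maxR) :
    (gcRender grid rows cols cells minR maxR minC maxC).headD [] =
      gcRow grid rows cols cells minC maxC minR := by
  rw [gcRender_eq, PySem.List.pyRange_one_cons (by omega)]
  simp

theorem gcRender_pyGet (grid : List (List Int)) (rows cols : Int) (cells : PySem.Dict (Int × Int) Int)
    (minR maxR minC maxC i : Int) (h1 : minR ≤ i) (h2 : i ≤ maxR) :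
    PySem.List.pyGet? (gcRender grid rows cols cells minR maxR minC maxC) (i - minR) =
      some (gcRow grid rows cols cells minC maxC i) := by
  rw [PySem.List.pyGet?_of_nonneg _ (by omega)]
  rw [List.getElem?_eq_getElem (by rw [gcRender_len]; omega)]
  rw [gcRender_getElem]
  rw [show minR + (((i - minR).toNat : Nat) : Int) = i from by omega]

theorem gcRow_pyGet (grid : List (List Int)) (rows cols : Int) (cells : PySem.Dict (Int × Int) Int)
    (minC maxC i j : Int) (h1 : minC ≤ j) (h2 : j ≤ maxC) :
    PySem.List.pyGet? (gcRow grid rows cols cells minC maxC i) (j - minC) =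
      some (gcCell grid rows cols cells i j) := by
  rw [PySem.List.pyGet?_of_nonneg _ (by omega)]
  rw [List.getElem?_eq_getElem (by rw [gcRow_len]; omega)]
  rw [gcRow_getElem]
  rw [show minC + (((j - minC).toNat : Nat) : Int) = j from by omega]

-- writing one in-bounds cell = Dict.insert under the rendering
theorem gcRender_insert (grid : List (List Int)) (rows cols : Int) (cells : PySem.Dict (Int × Int) Int)
    (minR maxR minC maxC r c v : Int) (hr1 : minR ≤ r) (hc1 : minC ≤ c) :
    gcRender grid rows cols (cells.insert (r, c) v) minR maxR minC maxC =
      (gcRender grid rows cols cells minR maxR minC maxC).modify (r - minR).toNat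
        (fun rw => rw.set (c - minC).toNat v) := by
  apply List.ext_getElem
  · simp [gcRender_len]
  · intro a h1 h2
    rw [List.getElem_modify]
    rw [gcRender_getElem _ _ _ _ _ _ _ _ a (by simpa [gcRender_len] using h1)]
    by_cases hrow : (r - minR).toNat = a
    · rw [if_pos hrow]
      rw [gcRender_getElem _ _ _ _ _ _ _ _ a (by simpa [gcRender_len] using h1)]
      apply List.ext_getElem
      · simp [gcRow_len]
      · intro b hb1 hb2
        rw [List.getElem_set]
        rw [gcRow_getElem _ _ _ _ _ _ _ b (by simpa [gcRow_len] using hb1)]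
        rw [gcCell_insert]
        by_cases hcol : (c - minC).toNat = b
        · rw [if_pos hcol, if_pos (by constructor <;> omega)]
        · rw [if_neg hcol, if_neg (by
            rintro ⟨h3, h4⟩
            apply hcol
            omega)]
          rw [gcRow_getElem _ _ _ _ _ _ _ b (by simpa [gcRow_len] using hb1)]
    · rw [if_neg hrow]
      rw [gcRender_getElem _ _ _ _ _ _ _ _ a (by simpa [gcRender_len] using h1)]
      apply List.ext_getElem
      · simp [gcRow_len]
      · intro b hb1 hb2
        rw [gcRow_getElem _ _ _ _ _ _ _ b (by simpa [gcRow_len] using hb1)]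
        rw [gcRow_getElem _ _ _ _ _ _ _ b (by simpa [gcRow_len] using hb1)]
        rw [gcCell_insert]
        rw [if_neg (by
          rintro ⟨h3, h4⟩
          apply hrow
          omega)]

-- the three phases of one loop step, on each side
def gcRowEnsA (st : List (List Int) × Int × Int × Int) : List (List Int) × Int × Int × Int :=
  (if st.2.2.1 < 0 then List.replicate (st.1.headD []).length (0 : Int) :: st.1
   else if st.2.2.1 ≥ (st.1.length : Int) then st.1 ++ [List.replicate (st.1.headD []).length (0 : Int)]
   else st.1,
   st.2.1,
   if st.2.2.1 < 0 then 0 else st.2.2.1,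
   st.2.2.2)

def gcColEnsA (st : List (List Int) × Int × Int × Int) : List (List Int) × Int × Int × Int :=
  (if st.2.1 < 0 then st.1.map (fun r => (0 : Int) :: r)
   else if st.2.1 ≥ ((st.1.headD []).length : Int) then st.1.map (fun r => r ++ [(0 : Int)])
   else st.1,
   if st.2.1 < 0 then 0 else st.2.1,
   st.2.2.1,
   st.2.2.2)

def gcTailA (st : List (List Int) × Int × Int × Int) : List (List Int) × Int × Int × Int :=
  let tile := (PySem.List.pyGet? ((PySem.List.pyGet? st.1 st.2.2.1).getD []) st.2.1).getD 0
  let dir2 := if tile = 1 then PySem.Int.mod (st.2.2.2 + 1) 4 else PySem.Int.mod (st.2.2.2 - 1) 4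
  let g3 := if tile = 1 then st.1.modify st.2.2.1.toNat (fun r => r.set st.2.1.toNat (0 : Int))
            else st.1.modify st.2.2.1.toNat (fun r => r.set st.2.1.toNat (1 : Int))
  let delta := (PySem.List.pyGet? [((-1 : Int), (0 : Int)), (0, 1), (1, 0), (0, -1)] dir2).getD (0, 0)
  (g3, st.2.1 + delta.2, st.2.2.1 + delta.1, dir2)

theorem gcStepA_decomp (st : List (List Int) × Int × Int × Int) :
    gcStepA st = gcTailA (gcColEnsA (gcRowEnsA st)) := rfl

def gcRowEnsB (s : GCState) : GCState :=
  if s.r < s.minR then { s with minR := s.minR - 1, r := s.minR - 1 }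
  else if s.r > s.maxR then { s with maxR := s.maxR + 1 }
  else s

def gcColEnsB (s : GCState) : GCState :=
  if s.c < s.minC then { s with minC := s.minC - 1, c := s.minC - 1 }
  else if s.c > s.maxC then { s with maxC := s.maxC + 1 }
  else s

def gcTailB (grid : List (List Int)) (rows cols : Int) (s : GCState) : GCState :=
  let tile := gcCell grid rows cols s.cells s.r s.c
  let s3 := if tile = 1 then { s with d := PySem.Int.mod (s.d + 1) 4, cells := s.cells.insert (s.r, s.c) 0 }
            else { s with d := PySem.Int.mod (s.d - 1) 4, cells := s.cells.insert (s.r, s.c) 1 }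
  let delta := (PySem.List.pyGet? [((-1 : Int), (0 : Int)), (0, 1), (1, 0), (0, -1)] s3.d).getD (0, 0)
  { s3 with r := s3.r + delta.1, c := s3.c + delta.2 }

theorem gcStepB_decomp (grid : List (List Int)) (rows cols : Int) (s : GCState) :
    gcStepB grid rows cols s = gcTailB grid rows cols (gcColEnsB (gcRowEnsB s)) := rfl

theorem gcDelta_bounds (d : Int) :
    -1 ≤ ((PySem.List.pyGet? [((-1 : Int), (0 : Int)), (0, 1), (1, 0), (0, -1)] (PySem.Int.mod d 4)).getD (0, 0)).1 ∧
    ((PySem.List.pyGet? [((-1 : Int), (0 : Int)), (0, 1), (1, 0), (0, -1)] (PySem.Int.mod d 4)).getD (0, 0)).1 ≤ 1 ∧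
    -1 ≤ ((PySem.List.pyGet? [((-1 : Int), (0 : Int)), (0, 1), (1, 0), (0, -1)] (PySem.Int.mod d 4)).getD (0, 0)).2 ∧
    ((PySem.List.pyGet? [((-1 : Int), (0 : Int)), (0, 1), (1, 0), (0, -1)] (PySem.Int.mod d 4)).getD (0, 0)).2 ≤ 1 := by
  have h0 := PySem.Int.mod_nonneg d (b := 4) (by norm_num)
  have h4 := PySem.Int.mod_lt d (b := 4) (by norm_num)
  have hcases : PySem.Int.mod d 4 = 0 ∨ PySem.Int.mod d 4 = 1 ∨ PySem.Int.mod d 4 = 2 ∨ PySem.Int.mod d 4 = 3 := by omega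
  rcases hcases with h | h | h | h <;> rw [h] <;> decide

theorem gcRowEns_sim (grid : List (List Int)) (hne : grid ≠ [])
    (s : GCState) (hm0 : s.minR ≤ 0) (hMr : (grid.length : Int) - 1 ≤ s.maxR) (hru : s.r ≤ s.maxR + 1)
    (hkeys : ∀ p : Int × Int, s.cells.contains p = true → s.minR ≤ p.1 ∧ p.1 ≤ s.maxR ∧ s.minC ≤ p.2 ∧ p.2 ≤ s.maxC) :
    gcRowEnsA (gcAbs grid s) = gcAbs grid (gcRowEnsB s) := by
  have hlen : (1 : Int) ≤ grid.length := by
    have := List.length_pos_of_ne_nil hne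
    omega
  unfold gcRowEnsA gcRowEnsB gcAbs
  dsimp only
  by_cases h1 : s.r < s.minR
  · rw [if_pos (show s.r - s.minR < 0 by omega), if_pos (show s.r - s.minR < 0 by omega), if_pos h1]
    dsimp only
    have hfresh : ∀ j : Int, s.cells.contains (s.minR - 1, j) = false := by
      intro j
      cases hcj : s.cells.contains (s.minR - 1, j) with
      | false => rfl
      | true =>
        have := (hkeys _ hcj).1
        dsimp at this
        omega
    rw [gcRender_cons _ _ _ _ _ _ _ _ (by omega)]
    rw [gcRow_fresh _ _ _ _ _ _ _ hfresh (by omega)]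
    rw [gcRender_headD _ _ _ _ _ _ _ _ (by omega)]
    rw [gcRow_len]
    refine Prod.ext rfl (Prod.ext rfl (Prod.ext (by dsimp; omega) rfl))
  · by_cases h2 : s.r > s.maxR
    · have hreq : s.r = s.maxR + 1 := by omega
      rw [if_neg (show ¬(s.r - s.minR < 0) by omega), if_neg (show ¬(s.r - s.minR < 0) by omega),
        if_pos (by rw [gcRender_len]; omega), if_neg h1, if_pos h2]
      dsimp only
      have hfresh : ∀ j : Int, s.cells.contains (s.maxR + 1, j) = false := by
        intro j
        cases hcj : s.cells.contains (s.maxR + 1, j) with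
        | false => rfl
        | true =>
          have := (hkeys _ hcj).2.1
          dsimp at this
          omega
      rw [gcRender_snoc _ _ _ _ _ _ _ _ (by omega)]
      rw [gcRow_fresh _ _ _ _ _ _ _ hfresh (by omega)]
      rw [gcRender_headD _ _ _ _ _ _ _ _ (by omega)]
      rw [gcRow_len]
    · rw [if_neg (show ¬(s.r - s.minR < 0) by omega), if_neg (show ¬(s.r - s.minR < 0) by omega),
        if_neg (by rw [gcRender_len]; omega), if_neg h1, if_neg h2]

theorem gcColEns_sim (grid : List (List Int)) (hne : grid ≠ [])
    (s : GCState) (hm0 : s.minR ≤ 0) (hMr : (grid.length : Int) - 1 ≤ s.maxR)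
    (hc0 : s.minC ≤ 0) (hMc : ((grid.headD []).length : Int) - 1 ≤ s.maxC) (hcu : s.c ≤ s.maxC + 1)
    (hkeys : ∀ p : Int × Int, s.cells.contains p = true → s.minR ≤ p.1 ∧ p.1 ≤ s.maxR ∧ s.minC ≤ p.2 ∧ p.2 ≤ s.maxC) :
    gcColEnsA (gcAbs grid s) = gcAbs grid (gcColEnsB s) := by
  have hlen : (1 : Int) ≤ grid.length := by
    have := List.length_pos_of_ne_nil hne
    omega
  have hwid : ((gcRender grid grid.length (grid.headD []).length s.cells s.minR s.maxR s.minC s.maxC).headD []).length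
      = (s.maxC + 1 - s.minC).toNat := by
    rw [gcRender_headD _ _ _ _ _ _ _ _ (by omega), gcRow_len]
  unfold gcColEnsA gcColEnsB gcAbs
  dsimp only
  by_cases h1 : s.c < s.minC
  · rw [if_pos (show s.c - s.minC < 0 by omega), if_pos (show s.c - s.minC < 0 by omega), if_pos h1]
    dsimp only
    have hfresh : ∀ i : Int, s.cells.contains (i, s.minC - 1) = false := by
      intro i
      cases hci : s.cells.contains (i, s.minC - 1) with
      | false => rfl
      | true =>
        have := (hkeys _ hci).2.2.1
        dsimp at this
        omega
    have hgrid : gcRender grid grid.length (grid.headD []).length s.cells s.minR s.maxR (s.minC - 1) s.maxC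
        = (gcRender grid grid.length (grid.headD []).length s.cells s.minR s.maxR s.minC s.maxC).map (fun r => (0 : Int) :: r) := by
      rw [gcRender_eq, gcRender_eq, List.map_map]
      apply List.map_congr_left
      intro i _
      show gcRow grid (grid.length : Int) ((grid.headD []).length : Int) s.cells (s.minC - 1) s.maxC i
        = (0 : Int) :: gcRow grid (grid.length : Int) ((grid.headD []).length : Int) s.cells s.minC s.maxC i
      rw [gcRow_cons _ _ _ _ _ _ _ (by omega), gcCell_fresh _ _ _ _ _ _ (hfresh i) (by omega)]
    rw [hgrid]
    refine Prod.ext rfl (Prod.ext (by dsimp; omega) rfl)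
  · by_cases h2 : s.c > s.maxC
    · have hceq : s.c = s.maxC + 1 := by omega
      rw [if_neg (show ¬(s.c - s.minC < 0) by omega), if_neg (show ¬(s.c - s.minC < 0) by omega),
        if_pos (by rw [hwid]; omega), if_neg h1, if_pos h2]
      dsimp only
      have hfresh : ∀ i : Int, s.cells.contains (i, s.maxC + 1) = false := by
        intro i
        cases hci : s.cells.contains (i, s.maxC + 1) with
        | false => rfl
        | true =>
          have := (hkeys _ hci).2.2.2
          dsimp at this
          omega
      have hgrid : gcRender grid grid.length (grid.headD []).length s.cells s.minR s.maxR s.minC (s.maxC + 1)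
          = (gcRender grid grid.length (grid.headD []).length s.cells s.minR s.maxR s.minC s.maxC).map (fun r => r ++ [(0 : Int)]) := by
        rw [gcRender_eq, gcRender_eq, List.map_map]
        apply List.map_congr_left
        intro i _
        show gcRow grid (grid.length : Int) ((grid.headD []).length : Int) s.cells s.minC (s.maxC + 1) i
          = gcRow grid (grid.length : Int) ((grid.headD []).length : Int) s.cells s.minC s.maxC i ++ [(0 : Int)]
        rw [gcRow_snoc _ _ _ _ _ _ _ (by omega), gcCell_fresh _ _ _ _ _ _ (hfresh i) (by omega)]
      rw [hgrid]
    · rw [if_neg (show ¬(s.c - s.minC < 0) by omega), if_neg (show ¬(s.c - s.minC < 0) by omega),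
        if_neg (by rw [hwid]; omega), if_neg h1, if_neg h2]

theorem gcTail_sim (grid : List (List Int))
    (s : GCState) (hr1 : s.minR ≤ s.r) (hr2 : s.r ≤ s.maxR) (hc1 : s.minC ≤ s.c) (hc2 : s.c ≤ s.maxC) :
    gcTailA (gcAbs grid s) = gcAbs grid (gcTailB grid grid.length (grid.headD []).length s) := by
  unfold gcTailA gcTailB gcAbs
  dsimp only
  rw [gcRender_pyGet _ _ _ _ _ _ _ _ _ hr1 hr2, Option.getD_some,
    gcRow_pyGet _ _ _ _ _ _ _ _ hc1 hc2, Option.getD_some]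
  by_cases ht : gcCell grid (grid.length : Int) ((grid.headD []).length : Int) s.cells s.r s.c = 1
  · simp only [if_pos ht]
    try dsimp only
    rw [← gcRender_insert _ _ _ _ _ _ _ _ _ _ _ hr1 hc1]
    refine Prod.ext rfl (Prod.ext (by dsimp; ring) (Prod.ext (by dsimp; ring) rfl))
  · simp only [if_neg ht]
    try dsimp only
    rw [← gcRender_insert _ _ _ _ _ _ _ _ _ _ _ hr1 hc1]
    refine Prod.ext rfl (Prod.ext (by dsimp; ring) (Prod.ext (by dsimp; ring) rfl))

theorem gcTailB_W (grid : List (List Int)) (s : GCState)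
    (hm0 : s.minR ≤ 0) (hMr : (grid.length : Int) - 1 ≤ s.maxR)
    (hc0 : s.minC ≤ 0) (hMc : ((grid.headD []).length : Int) - 1 ≤ s.maxC)
    (hr1 : s.minR ≤ s.r) (hr2 : s.r ≤ s.maxR) (hc1 : s.minC ≤ s.c) (hc2 : s.c ≤ s.maxC)
    (hkeys : ∀ p : Int × Int, s.cells.contains p = true → s.minR ≤ p.1 ∧ p.1 ≤ s.maxR ∧ s.minC ≤ p.2 ∧ p.2 ≤ s.maxC) :
    gcW grid (gcTailB grid grid.length (grid.headD []).length s) := by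
  unfold gcTailB
  have hbp := gcDelta_bounds (s.d + 1)
  have hbm := gcDelta_bounds (s.d - 1)
  by_cases ht : gcCell grid (grid.length : Int) ((grid.headD []).length : Int) s.cells s.r s.c = 1 <;>
    [simp only [if_pos ht]; simp only [if_neg ht]] <;> try dsimp only
  all_goals
    refine ⟨hm0, hMr, hc0, hMc, by dsimp only; omega, by dsimp only; omega, ?_⟩
  all_goals
    intro p hp
    dsimp only at hp ⊢
    rw [PySem.Dict.contains_insert] at hp
    rcases Bool.or_eq_true_iff.mp hp with h | h
    · have : p = (s.r, s.c) := by
        exact eq_of_beq h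
      subst this
      dsimp only
      refine ⟨hr1, hr2, hc1, hc2⟩
    · have := hkeys p h
      omega

theorem gcStep_sim (grid : List (List Int)) (hne : grid ≠ [])
    (s : GCState) (hW : gcW grid s) :
    gcStepA (gcAbs grid s) = gcAbs grid (gcStepB grid grid.length (grid.headD []).length s) ∧
    gcW grid (gcStepB grid grid.length (grid.headD []).length s) := by
  obtain ⟨hm0, hMr, hc0, hMc, hru, hcu, hkeys⟩ := hW
  have hlen : (1 : Int) ≤ grid.length := by
    have := List.length_pos_of_ne_nil hne
    omega
  -- facts about the row-ensure phase
  set s1 := gcRowEnsB s with hs1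
  have hrow1 : s1.cells = s.cells ∧ s1.minC = s.minC ∧ s1.maxC = s.maxC ∧ s1.c = s.c ∧ s1.d = s.d ∧
      s1.minR ≤ s.minR ∧ s.maxR ≤ s1.maxR ∧ s1.minR ≤ 0 ∧ (grid.length : Int) - 1 ≤ s1.maxR ∧
      s1.minR ≤ s1.r ∧ s1.r ≤ s1.maxR := by
    rw [hs1]
    unfold gcRowEnsB
    split_ifs with h1 h2 <;> (try dsimp only) <;> refine ⟨rfl, rfl, rfl, rfl, rfl, ?_, ?_, ?_, ?_, ?_, ?_⟩ <;> omega
  set s2 := gcColEnsB s1 with hs2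
  have hcol2 : s2.cells = s1.cells ∧ s2.minR = s1.minR ∧ s2.maxR = s1.maxR ∧ s2.r = s1.r ∧ s2.d = s1.d ∧
      s2.minC ≤ s1.minC ∧ s1.maxC ≤ s2.maxC ∧ s2.minC ≤ 0 ∧
      s2.minC ≤ s2.c ∧ s2.c ≤ s2.maxC := by
    rw [hs2]
    unfold gcColEnsB
    split_ifs with h1 h2 <;> (try dsimp only) <;> refine ⟨rfl, rfl, rfl, rfl, rfl, ?_, ?_, ?_, ?_, ?_⟩ <;> omega
  constructor
  · rw [gcStepA_decomp, gcStepB_decomp]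
    rw [gcRowEns_sim grid hne s hm0 hMr hru hkeys]
    rw [gcColEns_sim grid hne s1 (by omega) (by omega) (by rw [hrow1.2.1]; omega)
      (by rw [hrow1.2.2.1]; omega) (by rw [hrow1.2.2.2.1]; omega)
      (by rw [hrow1.1]; intro p hp; have := hkeys p hp; omega)]
    exact gcTail_sim grid s2 (by omega) (by omega) (by omega) (by omega)
  · rw [gcStepB_decomp]
    exact gcTailB_W grid s2 (by omega) (by omega) (by omega) (by omega) (by omega) (by omega)
      (by omega) (by omega)
      (by rw [hcol2.1, hrow1.1]; intro p hp; have := hkeys p hp; omega)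



theorem gcRender_init (grid : List (List Int))
    (hrect : ∀ r ∈ grid, r.length = (grid.headD []).length) :
    gcRender grid grid.length (grid.headD []).length PySem.Dict.empty 0 ((grid.length : Int) - 1) 0 (((grid.headD []).length : Int) - 1) = grid := by
  apply List.ext_getElem
  · rw [gcRender_len]; omega
  · intro a h1 h2
    rw [gcRender_getElem _ _ _ _ _ _ _ _ a h1]
    apply List.ext_getElem
    · rw [gcRow_len, hrect grid[a] (List.getElem_mem h2)]; omega
    · intro b hb1 hb2
      rw [gcRow_getElem _ _ _ _ _ _ _ b hb1]
      simp only [zero_add]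
      have hblt : (b : Int) < ((grid.headD []).length : Int) := by
        have := hrect grid[a] (List.getElem_mem h2)
        omega
      unfold gcCell
      rw [PySem.Dict.getD_of_not_contains _ _ (PySem.Dict.contains_empty _)]
      rw [if_pos (by refine ⟨by omega, by exact_mod_cast h2, by omega, hblt⟩)]
      rw [PySem.List.pyGet?_natCast grid, List.getElem?_eq_getElem h2, Option.getD_some,
        PySem.List.pyGet?_natCast, List.getElem?_eq_getElem hb2, Option.getD_some]

theorem gcFold_sim (grid : List (List Int)) (hne : grid ≠ []) (l : List Int) :
    ∀ s : GCState, gcW grid s →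
      l.foldl (fun st _ => gcStepA st) (gcAbs grid s) =
        gcAbs grid (l.foldl (fun s _ => gcStepB grid grid.length (grid.headD []).length s) s) ∧
      gcW grid (l.foldl (fun s _ => gcStepB grid grid.length (grid.headD []).length s) s) := by
  induction l with
  | nil => intro s hW; exact ⟨rfl, hW⟩
  | cons x xs ih =>
    intro s hW
    obtain ⟨hstep, hWs⟩ := gcStep_sim grid hne s hW
    simpa [List.foldl_cons, hstep] using ih _ hWs

-- ===== VERDICT (by name: the statement is the Claim_ definition above) =====
theorem Grid_Cleaner_spec : Claim_equal_Grid_Cleaner := by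
  intro grid col row n direction _hdom hpre
  unfold Spec_Grid_Cleaner Grid_Cleaner Grid_Cleaner_alt
  by_cases hn : n ≤ 0
  · rw [PySem.List.pyRange_one_eq_nil (by omega), if_pos hn, List.foldl_nil]
  · rcases hpre with h | ⟨hne, hrect, hrow, hcol⟩
    · omega
    rw [if_neg hn]
    have hlen : (1 : Int) ≤ grid.length := by
      have := List.length_pos_of_ne_nil hne
      omega
    have hW0 : gcW grid ⟨PySem.Dict.empty, 0, (grid.length : Int) - 1, 0, ((grid.headD []).length : Int) - 1, row, col, direction⟩ := by
      refine ⟨?_, ?_, ?_, ?_, ?_, ?_, ?_⟩ <;> dsimp only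
      · omega
      · omega
      · omega
      · omega
      · omega
      · omega
      · intro p hp
        rw [PySem.Dict.contains_empty] at hp
        exact absurd hp (by simp)
    have habs0 : gcAbs grid ⟨PySem.Dict.empty, 0, (grid.length : Int) - 1, 0, ((grid.headD []).length : Int) - 1, row, col, direction⟩ = (grid, col, row, direction) := by
      unfold gcAbs
      dsimp only
      rw [gcRender_init grid hrect]
      norm_num
    obtain ⟨heq, _⟩ := gcFold_sim grid hne (PySem.List.pyRange 0 n 1) _ hW0
    rw [habs0] at heq
    rw [heq]
    rfl
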